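-- pv_equiv track=rewrite | github.com/Igor961-bot/SoundAnalysis1 | audio_features.py | remove_short_non_silence_runs
-- ===== SOURCE A (Python) =====
-- def remove_short_non_silence_runs(labels: list[str], max_run_length: int) -> list[str]:
--     if not labels or max_run_length <= 0:
--         return labels
--
--     cleaned_labels = labels[:]
--     start_index = 0
--
--     while start_index < len(labels):
--         end_index = start_index + 1
--         while end_index < len(labels) and labels[end_index] == labels[start_index]:
--             end_index += 1
--
--         run_label = labels[start_index]
--         run_length = end_index - start_index
--         left_label = labels[start_index - 1] if start_index > 0 else None
--         right_label = labels[end_index] if end_index < len(labels) else None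
--
--         if (
--             run_label != "silence"
--             and run_length <= max_run_length
--             and left_label == "silence"
--             and right_label == "silence"
--         ):
--             for index in range(start_index, end_index):
--                 cleaned_labels[index] = "silence"
--
--         start_index = end_index
--
--     return cleaned_labels
-- ===== SOURCE B (Python) =====
-- def remove_short_non_silence_runs(labels: list[str], max_run_length: int) -> list[str]:
--     if not labels or max_run_length <= 0:
--         return labels
--
--     silence_at = [i for i, label in enumerate(labels) if label == "silence"]
--     out = list(labels)
--     for p, q in zip(silence_at, silence_at[1:]):
--         gap = labels[p + 1:q]
--         if len(gap) <= max_run_length and len(set(gap)) == 1: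
--             out[p + 1:q] = ["silence"] * len(gap)
--     return out
-- ===== Notes on version B (the rewrite author's own statement) =====
-- stated objective: alternative
-- what changed: Instead of scanning maximal equal-label runs with nested index-based while-loops, B indexes the silence positions once with a comprehension, then for each pair of consecutive silence positions tests whether the gap between them is a single short uniform run (len(set(gap)) == 1) and splices 'silence' into that slice.
import Mathlib
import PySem

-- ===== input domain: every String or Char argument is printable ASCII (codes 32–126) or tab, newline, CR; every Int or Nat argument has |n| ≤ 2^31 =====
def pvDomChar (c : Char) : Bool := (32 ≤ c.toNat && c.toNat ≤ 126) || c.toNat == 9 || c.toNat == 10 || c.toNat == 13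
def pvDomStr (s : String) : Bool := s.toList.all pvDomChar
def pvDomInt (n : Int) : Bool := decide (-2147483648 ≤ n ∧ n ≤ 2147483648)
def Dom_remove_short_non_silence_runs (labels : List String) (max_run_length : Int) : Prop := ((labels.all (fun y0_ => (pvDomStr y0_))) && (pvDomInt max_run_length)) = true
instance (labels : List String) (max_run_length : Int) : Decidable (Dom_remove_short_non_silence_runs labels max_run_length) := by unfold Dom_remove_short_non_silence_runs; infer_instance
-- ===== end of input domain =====

-- B replaces A's run-scanning while-loops by a different algorithm: index the silence
-- positions once, then splice "silence" over each short uniform gap between two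
-- consecutive silence positions (objective: alternative; same asymptotic cost).

-- ===== PORT A =====

-- inner `while end_index < len(labels) and labels[end_index] == labels[start_index]`
def pvFindEnd (labels : List String) (runLabel : String) (e : Nat) : Nat :=
  if h : e < labels.length then
    if labels[e] = runLabel then pvFindEnd labels runLabel (e + 1) else e
  else e
termination_by labels.length - e

-- bound used by pvLoopA's termination argument
theorem pvFindEnd_ge (labels : List String) (runLabel : String) (e : Nat) :
    e ≤ pvFindEnd labels runLabel e := by
  rw [pvFindEnd]
  split
  · split
    · exact le_trans (Nat.le_succ e) (pvFindEnd_ge labels runLabel (e + 1))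
    · exact le_refl e
  · exact le_refl e
termination_by labels.length - e

-- `for index in range(start_index, end_index): cleaned_labels[index] = "silence"`
def pvSetRange (c : List String) (i e : Nat) : List String :=
  if i < e then pvSetRange (c.set i "silence") (i + 1) e else c
termination_by e - i

-- outer `while start_index < len(labels)`
def pvLoopA (labels : List String) (max_run_length : Int) (cleaned : List String) (start : Nat) : List String :=
  if h : start < labels.length then
    let runLabel := labels[start]
    let e := pvFindEnd labels runLabel (start + 1)
    let left : Option String := if 0 < start then labels[start - 1]? else none
    let right : Option String := labels[e]?
    let cleaned' :=
      if runLabel ≠ "silence" ∧ (e : Int) - (start : Int) ≤ max_run_length ∧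
          left = some "silence" ∧ right = some "silence"
      then pvSetRange cleaned start e else cleaned
    pvLoopA labels max_run_length cleaned' e
  else cleaned
termination_by labels.length - start
decreasing_by
  have := pvFindEnd_ge labels labels[start] (start + 1)
  omega

def remove_short_non_silence_runs (labels : List String) (max_run_length : Int) : List String :=
  if labels = [] ∨ max_run_length ≤ 0 then labels
  else pvLoopA labels max_run_length labels 0

-- ===== PORT B =====

-- `[i for i, label in enumerate(labels) if label == "silence"]`
def pvSilenceAt (labels : List String) : List Int :=
  ((PySem.List.enumerate labels).filter (fun il => il.2 == "silence")).map Prod.fst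

-- the `for p, q in zip(silence_at, silence_at[1:])` loop; the slice assignment
-- `out[p+1:q] = ["silence"] * len(gap)` is out[:p+1] ++ new ++ out[q:], which is exact
-- here since 0 ≤ p < q are in-range indices
def pvBLoop (labels : List String) (m : Int) (out : List String) : List (Int × Int) → List String
  | [] => out
  | (p, q) :: rest =>
      let gap := PySem.List.slice labels (some (p + 1)) (some q)
      let out' :=
        if (gap.length : Int) ≤ m ∧ (PySem.Set.ofList gap).length = 1
        then PySem.List.slice out none (some (p + 1)) ++ List.replicate gap.length "silence"
              ++ PySem.List.slice out (some q) none
        else out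
      pvBLoop labels m out' rest

def remove_short_non_silence_runs_alt (labels : List String) (max_run_length : Int) : List String :=
  if labels = [] ∨ max_run_length ≤ 0 then labels
  else
    let silence_at := pvSilenceAt labels
    pvBLoop labels max_run_length labels
      (silence_at.zip (PySem.List.slice silence_at (some 1) none))

-- ===== PRECONDITION & SPEC =====
def Spec_remove_short_non_silence_runs (labels : List String) (max_run_length : Int) (out : List String) : Prop := out = remove_short_non_silence_runs_alt labels max_run_length
instance (labels : List String) (max_run_length : Int) (out : List String) : Decidable (Spec_remove_short_non_silence_runs labels max_run_length out) := by unfold Spec_remove_short_non_silence_runs; infer_instance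

-- ===== CLAIM (what is proved, stated in full; the proofs are below) =====
def Claim_equal_remove_short_non_silence_runs : Prop := ∀ (labels : List String) (max_run_length : Int), Dom_remove_short_non_silence_runs labels max_run_length → Spec_remove_short_non_silence_runs labels max_run_length (remove_short_non_silence_runs labels max_run_length)

-- ===== LEMMAS AND PROOFS =====

-- Reference function G: the run decomposition of `labels` with runs emitted conditionally.
-- Both ports are proved equal to G.
def pvGroupby : List String → List (String × Nat)
  | [] => []
  | l :: t =>
      (l, 1 + (t.takeWhile (· == l)).length) :: pvGroupby (t.dropWhile (· == l))
termination_by xs => xs.length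
decreasing_by
  have := List.length_dropWhile_le (· == l) t
  simp only [List.length_cons]
  omega

def pvEmit (max_run_length : Int) (prev : Option String) : List (String × Nat) → List String
  | [] => []
  | (label, count) :: rest =>
      let next := rest.head?.map Prod.fst
      (if label ≠ "silence" ∧ (count : Int) ≤ max_run_length ∧
          prev = some "silence" ∧ next = some "silence"
       then List.replicate count "silence" else List.replicate count label)
        ++ pvEmit max_run_length (some label) rest

-- ---------- A = G (loop invariant for pvLoopA over the run structure) ----------

theorem pvFindEnd_eq (labels : List String) (r : String) (e : Nat) :
    pvFindEnd labels r e = e + ((labels.drop e).takeWhile (· == r)).length := by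
  rw [pvFindEnd]
  split
  · rename_i h
    have hdrop : labels.drop e = labels[e] :: labels.drop (e + 1) :=
      (List.getElem_cons_drop h).symm
    split
    · rename_i heq
      rw [pvFindEnd_eq labels r (e + 1), hdrop]
      simp [heq]
      omega
    · rename_i hne
      rw [hdrop]
      simp [hne]
  · rename_i h
    rw [List.drop_eq_nil_of_le (by omega)]
    simp
termination_by labels.length - e

theorem pvSetRange_eq (m : Nat) : ∀ (done rs : List String), m ≤ rs.length →
    pvSetRange (done ++ rs) done.length (done.length + m)
      = done ++ List.replicate m "silence" ++ rs.drop m := by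
  induction m with
  | zero => intro done rs _; rw [pvSetRange]; simp
  | succ m ih =>
    intro done rs hm
    cases rs with
    | nil => simp at hm
    | cons r rs' =>
      rw [pvSetRange]
      have hlt : done.length < done.length + (m + 1) := by omega
      rw [if_pos hlt]
      have hset : (done ++ r :: rs').set done.length "silence"
          = (done ++ ["silence"]) ++ rs' := by
        rw [List.set_append_right _ _ (le_refl _)]
        simp
      rw [hset]
      have h2 : (done ++ ["silence"]).length = done.length + 1 := by simp
      have hrec := ih (done ++ ["silence"]) rs' (by simpa using hm)
      rw [h2] at hrec
      have harg : done.length + 1 + m = done.length + (m + 1) := by omega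
      rw [harg] at hrec
      rw [hrec]
      simp [List.replicate_succ]

theorem pvTakeWhile_replicate (l : String) (t : List String) :
    t.takeWhile (· == l) = List.replicate (t.takeWhile (· == l)).length l := by
  rw [List.eq_replicate_iff]
  refine ⟨rfl, fun b hb => ?_⟩
  have hp := List.mem_takeWhile_imp hb
  simpa using hp

theorem pvDropWhile_eq_drop (t : List String) (p : String → Bool) :
    t.dropWhile p = t.drop (t.takeWhile p).length := by
  induction t with
  | nil => simp
  | cons a t ih => by_cases hp : p a <;> simp [hp, ih]

theorem pvRunSplit (l : String) (t : List String) :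
    t = List.replicate (t.takeWhile (· == l)).length l
      ++ t.drop (t.takeWhile (· == l)).length := by
  conv_lhs => rw [← List.takeWhile_append_dropWhile (p := (· == l)) (l := t)]
  rw [pvDropWhile_eq_drop]
  congr 1
  exact pvTakeWhile_replicate l t

theorem pvGroupby_head (xs : List (String)) :
    (pvGroupby xs).head?.map Prod.fst = xs.head? := by
  cases xs <;> simp [pvGroupby]

theorem pvStep (labels : List String) (start : Nat) (h : start < labels.length) :
    ∃ k, pvFindEnd labels (labels[start]'h) (start + 1) = start + 1 + k ∧
      k ≤ labels.length - (start + 1) ∧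
      labels.drop start = List.replicate (1 + k) (labels[start]'h) ++ labels.drop (start + 1 + k) ∧
      pvGroupby (labels.drop start)
        = (labels[start]'h, 1 + k) :: pvGroupby (labels.drop (start + 1 + k)) ∧
      labels[start + k]? = some (labels[start]'h) := by
  have hcons : labels.drop start = labels[start]'h :: labels.drop (start + 1) :=
    (List.getElem_cons_drop h).symm
  refine ⟨((labels.drop (start + 1)).takeWhile (· == labels[start]'h)).length,
    pvFindEnd_eq labels _ (start + 1), ?_, ?_, ?_, ?_⟩
  · have := (List.takeWhile_prefix (p := (· == labels[start]'h))
      (l := labels.drop (start + 1))).length_le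
    simpa using this
  · rw [hcons]
    have h1 : (labels.drop (start + 1)).drop
          ((labels.drop (start + 1)).takeWhile (· == labels[start]'h)).length
        = labels.drop (start + 1 +
          ((labels.drop (start + 1)).takeWhile (· == labels[start]'h)).length) := by
      rw [List.drop_drop]
    rw [← h1]
    rw [Nat.add_comm 1 _, List.replicate_succ, List.cons_append]
    congr 1
    exact pvRunSplit _ _
  · have h1 : (labels.drop (start + 1)).drop
          ((labels.drop (start + 1)).takeWhile (· == labels[start]'h)).length
        = labels.drop (start + 1 +
          ((labels.drop (start + 1)).takeWhile (· == labels[start]'h)).length) := by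
      rw [List.drop_drop]
    rw [hcons, pvGroupby, pvDropWhile_eq_drop, h1]
  · rw [← List.getElem?_drop]
    have hsplit : labels.drop start
        = List.replicate (1 + ((labels.drop (start + 1)).takeWhile (· == labels[start]'h)).length)
            (labels[start]'h)
          ++ labels.drop (start + 1 +
            ((labels.drop (start + 1)).takeWhile (· == labels[start]'h)).length) := by
      rw [hcons]
      have h1 : (labels.drop (start + 1)).drop
            ((labels.drop (start + 1)).takeWhile (· == labels[start]'h)).length
          = labels.drop (start + 1 +
            ((labels.drop (start + 1)).takeWhile (· == labels[start]'h)).length) := by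
        rw [List.drop_drop]
      rw [← h1]
      rw [Nat.add_comm 1 _, List.replicate_succ, List.cons_append]
      congr 1
      exact pvRunSplit _ _
    rw [hsplit]
    rw [List.getElem?_append_left (by simp)]
    simp

theorem pvLoopA_eq (max_run_length : Int) (labels : List String) :
    ∀ (n : Nat) (done : List String) (prev : Option String),
      labels.length - done.length < n →
      prev = (if done.length = 0 then none else labels[done.length - 1]?) →
      pvLoopA labels max_run_length (done ++ labels.drop done.length) done.length
        = done ++ pvEmit max_run_length prev (pvGroupby (labels.drop done.length)) := by
  intro n
  induction n with
  | zero => intro done prev hn _; omega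
  | succ n ih =>
    intro done prev hn hprev
    by_cases h : done.length < labels.length
    · obtain ⟨k, hE, hk, hsplit, hgb, hpk⟩ := pvStep labels done.length h
      rw [pvLoopA]
      simp only [dif_pos h]
      rw [hE, hgb, pvEmit]
      have hhead : (pvGroupby (labels.drop (done.length + 1 + k))).head?.map Prod.fst
          = labels[done.length + 1 + k]? := by
        rw [pvGroupby_head, List.head?_drop]
      have h2 : ((done.length + 1 + k : Nat) : Int) - (done.length : Nat) ≤ max_run_length
          ↔ ((1 + k : Nat) : Int) ≤ max_run_length := by
        push_cast
        omega
      have h3 : (if 0 < done.length then labels[done.length - 1]? else none) = some "silence"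
          ↔ prev = some "silence" := by
        rw [hprev]
        rcases Nat.eq_zero_or_pos done.length with h0 | h0
        · simp [h0]
        · rw [if_pos h0, if_neg (by omega)]
      have hcond :
          (labels[done.length] ≠ "silence" ∧
            ((done.length + 1 + k : Nat) : Int) - (done.length : Nat) ≤ max_run_length ∧
            (if 0 < done.length then labels[done.length - 1]? else none) = some "silence" ∧
            labels[done.length + 1 + k]? = some "silence")
          ↔ (labels[done.length] ≠ "silence" ∧
            ((1 + k : Nat) : Int) ≤ max_run_length ∧
            prev = some "silence" ∧
            (pvGroupby (labels.drop (done.length + 1 + k))).head?.map Prod.fst = some "silence") := by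
        rw [hhead]
        exact and_congr Iff.rfl (and_congr h2 (and_congr h3 Iff.rfl))
      have hlen1 : k ≤ (labels.drop done.length).length := by simp; omega
      have harith : done.length + 1 + k = done.length + (1 + k) := by omega
      by_cases hc : labels[done.length] ≠ "silence" ∧
          ((1 + k : Nat) : Int) ≤ max_run_length ∧
          prev = some "silence" ∧
          (pvGroupby (labels.drop (done.length + 1 + k))).head?.map Prod.fst = some "silence"
      · rw [if_pos (hcond.mpr hc), if_pos hc]
        have hsr : pvSetRange (done ++ labels.drop done.length) done.length (done.length + 1 + k)
            = (done ++ List.replicate (1 + k) "silence") ++ labels.drop (done.length + 1 + k) := by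
          rw [harith, pvSetRange_eq (1 + k) done (labels.drop done.length) (by simp; omega)]
          rw [List.drop_drop]
        rw [hsr]
        have hlen' : (done ++ List.replicate (1 + k) "silence").length = done.length + 1 + k := by
          simp; omega
        have hih := ih (done ++ List.replicate (1 + k) "silence") (some labels[done.length])
          (by rw [hlen']; omega)
          (by rw [hlen', if_neg (by omega), show done.length + 1 + k - 1 = done.length + k by omega]
              exact hpk.symm)
        rw [hlen'] at hih
        rw [hih]
        simp [List.append_assoc]
      · rw [if_neg (fun hx => hc (hcond.mp hx)), if_neg hc]
        have hkeep : done ++ labels.drop done.length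
            = (done ++ List.replicate (1 + k) labels[done.length]) ++ labels.drop (done.length + 1 + k) := by
          rw [hsplit]
          simp [List.append_assoc]
        rw [hkeep]
        have hlen' : (done ++ List.replicate (1 + k) labels[done.length]).length = done.length + 1 + k := by
          simp; omega
        have hih := ih (done ++ List.replicate (1 + k) labels[done.length]) (some labels[done.length])
          (by rw [hlen']; omega)
          (by rw [hlen', if_neg (by omega), show done.length + 1 + k - 1 = done.length + k by omega]
              exact hpk.symm)
        rw [hlen'] at hih
        rw [hih]
        simp [List.append_assoc]
    · rw [pvLoopA]
      rw [dif_neg h]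
      rw [List.drop_eq_nil_of_le (by omega)]
      simp [pvGroupby, pvEmit]

-- ---------- B = G ----------

-- ghost Nat-indexed silence positions
def pvSilN : List String → List Nat
  | [] => []
  | a :: t => (if a = "silence" then [0] else []) ++ (pvSilN t).map (· + 1)

-- ghost Nat-indexed loop
def pvBLoopN (labels : List String) (m : Int) (out : List String) : List (Nat × Nat) → List String
  | [] => out
  | (p, q) :: rest =>
      let gap := (labels.drop (p + 1)).take (q - (p + 1))
      let out' :=
        if (gap.length : Int) ≤ m ∧ (PySem.Set.ofList gap).length = 1
        then out.take (p + 1) ++ List.replicate gap.length "silence" ++ out.drop q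
        else out
      pvBLoopN labels m out' rest

theorem pvSilenceAt_shift (t : List String) : ∀ (s : Int),
    ((PySem.List.enumerate t s).filter (fun il => il.2 == "silence")).map Prod.fst
      = (pvSilN t).map (fun n : Nat => s + (n : Int)) := by
  induction t with
  | nil => intro s; simp [PySem.List.enumerate_nil, pvSilN]
  | cons a t ih =>
    intro s
    rw [PySem.List.enumerate_cons, pvSilN]
    have hmap : ((pvSilN t).map (· + 1)).map (fun n : Nat => s + (n : Int))
        = (pvSilN t).map (fun n : Nat => (s + 1) + (n : Int)) := by
      rw [List.map_map]
      apply List.map_congr_left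
      intro n _
      simp only [Function.comp_apply]
      push_cast
      ring
    by_cases ha : a = "silence"
    · rw [List.filter_cons_of_pos (by simp [ha])]
      rw [List.map_cons, ih (s + 1), if_pos ha]
      rw [List.map_append, hmap]
      simp
    · rw [List.filter_cons_of_neg (by simp [ha])]
      rw [ih (s + 1), if_neg ha]
      rw [List.nil_append, hmap]

theorem pvSilenceAt_eq (labels : List String) :
    pvSilenceAt labels = (pvSilN labels).map (Nat.cast : Nat → Int) := by
  unfold pvSilenceAt
  rw [pvSilenceAt_shift labels 0]
  apply List.map_congr_left
  intro n _
  omega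

theorem pvBLoop_eq (labels : List String) (m : Int) :
    ∀ (prs : List (Nat × Nat)) (out : List String),
      pvBLoop labels m out (prs.map (Prod.map (Nat.cast : Nat → Int) (Nat.cast : Nat → Int)))
        = pvBLoopN labels m out prs := by
  intro prs
  induction prs with
  | nil => intro out; rfl
  | cons pq rest ih =>
    intro out
    obtain ⟨p, q⟩ := pq
    rw [List.map_cons]
    show pvBLoop labels m out (((p : Int), (q : Int)) :: _) = _
    rw [pvBLoop, pvBLoopN]
    have hcast : ((p : Int) + 1) = ((p + 1 : Nat) : Int) := by push_cast; ring
    have hgap : PySem.List.slice labels (some ((p : Int) + 1)) (some (q : Int))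
        = (labels.drop (p + 1)).take (q - (p + 1)) := by
      rw [hcast, PySem.List.slice_natCast]
    have htake : PySem.List.slice out none (some ((p : Int) + 1)) = out.take (p + 1) := by
      rw [hcast, PySem.List.slice_to_natCast]
    have hdrop : PySem.List.slice out (some (q : Int)) none = out.drop q := by
      rw [PySem.List.slice_from_natCast]
    rw [hgap, htake, hdrop]
    exact ih _

theorem pvBLoopN_shift (m : Int) :
    ∀ (prs : List (Nat × Nat)) (front out full : List String),
      pvBLoopN full m (front ++ out)
          (prs.map (Prod.map (· + front.length) (· + front.length)))
        = front ++ pvBLoopN (full.drop front.length) m out prs := by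
  intro prs
  induction prs with
  | nil => intro front out full; rfl
  | cons pq rest ih =>
    intro front out full
    obtain ⟨p, q⟩ := pq
    rw [List.map_cons]
    show pvBLoopN full m (front ++ out) ((p + front.length, q + front.length) :: _) = _
    rw [pvBLoopN, pvBLoopN]
    have hgap : (full.drop (p + front.length + 1)).take (q + front.length - (p + front.length + 1))
        = ((full.drop front.length).drop (p + 1)).take (q - (p + 1)) := by
      rw [List.drop_drop]
      rw [show q + front.length - (p + front.length + 1) = q - (p + 1) by omega]
      rw [show p + front.length + 1 = p + 1 + front.length by omega,
        Nat.add_comm (p + 1) front.length]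
    rw [hgap]
    have htake : (front ++ out).take (p + front.length + 1) = front ++ out.take (p + 1) := by
      rw [show p + front.length + 1 = front.length + (p + 1) by omega]
      rw [List.take_append, List.take_of_length_le (by omega), Nat.add_sub_cancel_left]
    have hdrop : (front ++ out).drop (q + front.length) = out.drop q := by
      rw [show q + front.length = front.length + q by omega]
      rw [List.drop_append, List.drop_eq_nil_of_le (by omega), Nat.add_sub_cancel_left,
        List.nil_append]
    rw [htake, hdrop]
    split
    · have h := ih front (out.take (p + 1)
        ++ List.replicate ((List.take (q - (p + 1)) (List.drop (p + 1) (List.drop front.length full))).length) "silence"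
        ++ out.drop q) full
      simpa [List.append_assoc] using h
    · exact ih front out full

theorem pvSilN_eq_nil (t : List String) (h : "silence" ∉ t) : pvSilN t = [] := by
  induction t with
  | nil => rfl
  | cons a t ih =>
    simp only [List.mem_cons, not_or] at h
    rw [pvSilN, if_neg (fun he => h.1 he.symm), ih h.2]
    rfl

theorem pvSilN_append_free (seg : List String) (x : List String) (h : "silence" ∉ seg) :
    pvSilN (seg ++ x) = (pvSilN x).map (· + seg.length) := by
  induction seg with
  | nil => simp
  | cons a t ih =>
    simp only [List.mem_cons, not_or] at h
    rw [List.cons_append, pvSilN, if_neg (fun he => h.1 he.symm), ih h.2]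
    rw [List.nil_append, List.map_map]
    apply List.map_congr_left
    intro n _
    simp only [Function.comp_apply, List.length_cons]
    omega

-- run-decomposition helpers
theorem pvTW_rep (a b : String) (hb : b ≠ a) (n : Nat) (rest : List String) :
    ((List.replicate n a ++ b :: rest).takeWhile (· == a)) = List.replicate n a := by
  induction n with
  | zero => simp [hb]
  | succ n ih => simp [List.replicate_succ, ih]

theorem pvDW_rep (a b : String) (hb : b ≠ a) (n : Nat) (rest : List String) :
    ((List.replicate n a ++ b :: rest).dropWhile (· == a)) = b :: rest := by
  induction n with
  | zero => simp [hb]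
  | succ n ih => simp [List.replicate_succ, ih]

theorem pvGroupby_cons (a : String) (t : List String) :
    pvGroupby (a :: t)
      = (a, (t.takeWhile (· == a)).length + 1) :: pvGroupby (t.dropWhile (· == a)) := by
  rw [pvGroupby, Nat.add_comm]

theorem pvGroupby_run (a c : String) (hc : c ≠ a) (n : Nat) (rest : List String) :
    pvGroupby (List.replicate (n + 1) a ++ c :: rest) = (a, n + 1) :: pvGroupby (c :: rest) := by
  rw [List.replicate_succ, List.cons_append, pvGroupby_cons,
    pvTW_rep a c hc, pvDW_rep a c hc, List.length_replicate]

theorem pvEmit_cons (m : Int) (prev : Option String) (a : String) (c : Nat)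
    (gs : List (String × Nat)) :
    pvEmit m prev ((a, c) :: gs)
      = (if a ≠ "silence" ∧ (c : Int) ≤ m ∧ prev = some "silence" ∧
            gs.head?.map Prod.fst = some "silence"
         then List.replicate c "silence" else List.replicate c a)
        ++ pvEmit m (some a) gs := by
  rw [pvEmit]

-- decomposition at the first silence
theorem pvDecomp (v : List String) (h : "silence" ∈ v) :
    ∃ seg w, v = seg ++ "silence" :: w ∧ "silence" ∉ seg := by
  induction v with
  | nil => simp at h
  | cons a t ih =>
    by_cases ha : a = "silence"
    · exact ⟨[], t, by rw [ha, List.nil_append], by simp⟩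
    · have ht : "silence" ∈ t := by
        rcases List.mem_cons.mp h with h1 | h1
        · exact absurd h1.symm ha
        · exact h1
      obtain ⟨seg, w, h1, h2⟩ := ih ht
      refine ⟨a :: seg, w, by rw [List.cons_append, h1], ?_⟩
      simp only [List.mem_cons, not_or]
      exact ⟨fun he => ha he.symm, h2⟩

-- split a nonempty list at its leading run
theorem pvHeadRun (a : String) (t : List String) :
    a :: t = List.replicate ((t.takeWhile (· == a)).length + 1) a ++ t.dropWhile (· == a) := by
  rw [List.replicate_succ, List.cons_append]
  congr 1
  rw [pvDropWhile_eq_drop]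
  conv_lhs => rw [pvRunSplit a t]

theorem pvDW_head (a b : String) (t t'' : List String)
    (h : t.dropWhile (· == a) = b :: t'') : b ≠ a := by
  induction t with
  | nil => simp at h
  | cons c t ih =>
    rw [List.dropWhile_cons] at h
    by_cases hc : c = a
    · rw [if_pos (by simp [hc])] at h
      exact ih h
    · rw [if_neg (by simp [hc])] at h
      rw [← (List.cons.injEq _ _ _ _).mp h |>.1]
      exact hc

-- peel one leading "silence" off G
theorem pvEmit_peel (m : Int) (prev : Option String) (x : List String) :
    pvEmit m prev (pvGroupby ("silence" :: x))
      = "silence" :: pvEmit m (some "silence") (pvGroupby x) := by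
  rw [pvGroupby_cons]
  rw [pvEmit_cons]
  rw [if_neg (by intro hx; exact hx.1 rfl)]
  cases x with
  | nil => simp [pvGroupby, pvEmit]
  | cons c x' =>
    by_cases hc : c = "silence"
    · subst hc
      rw [List.takeWhile_cons_of_pos (by simp), List.dropWhile_cons_of_pos (by simp)]
      rw [pvGroupby_cons, pvEmit_cons]
      rw [if_neg (by intro hx; exact hx.1 rfl)]
      simp [List.replicate_succ]
    · rw [List.takeWhile_cons_of_neg (by simp [hc]), List.dropWhile_cons_of_neg (by simp [hc])]
      simp

-- a silence-free list is emitted unchanged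
theorem pvEmit_free (m : Int) :
    ∀ (n : Nat) (seg : List String), seg.length < n → "silence" ∉ seg →
    ∀ (prev : Option String), pvEmit m prev (pvGroupby seg) = seg := by
  intro n
  induction n with
  | zero => intro seg h _ _; omega
  | succ n ih =>
    intro seg hlen hfree prev
    cases seg with
    | nil => simp [pvGroupby, pvEmit]
    | cons a t =>
      simp only [List.mem_cons, not_or] at hfree
      have ha : a ≠ "silence" := fun he => hfree.1 he.symm
      rw [pvGroupby_cons, pvEmit_cons, pvGroupby_head]
      cases ht' : t.dropWhile (· == a) with
      | nil =>
        rw [if_neg (by intro hx; simp at hx)]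
        rw [show pvGroupby ([] : List String) = [] from by rw [pvGroupby]]
        rw [show pvEmit m (some a) [] = [] from rfl, List.append_nil]
        conv_rhs => rw [pvHeadRun a t]
        rw [ht', List.append_nil]
      | cons b t'' =>
        have hb : b ≠ a := pvDW_head a b t t'' ht'
        have hbmem : b ∈ t := by
          have : b ∈ t.dropWhile (· == a) := by rw [ht']; simp
          exact (List.dropWhile_sublist _).mem this
        have hbs : b ≠ "silence" := fun he => hfree.2 (he ▸ hbmem)
        rw [if_neg (by intro hx; exact hbs (by simpa using hx.2.2.2))]
        rw [ih (b :: t'') (by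
            have := List.length_dropWhile_le (· == a) t
            rw [ht'] at this
            simp only [List.length_cons] at this hlen ⊢
            omega)
          (by simp only [List.mem_cons, not_or]
              refine ⟨fun he => hbs he.symm, fun hmem => hfree.2 ?_⟩
              have : "silence" ∈ t.dropWhile (· == a) := by rw [ht']; simp [hmem]
              exact (List.dropWhile_sublist _).mem this) (some a)]
        conv_rhs => rw [pvHeadRun a t]
        rw [ht']

-- a silence-free prefix entered with prev ≠ silence is emitted unchanged
theorem pvEmit_free_before (m : Int) :
    ∀ (n : Nat) (seg : List String), seg.length < n → "silence" ∉ seg →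
    ∀ (w : List String) (prev : Option String), prev ≠ some "silence" →
      pvEmit m prev (pvGroupby (seg ++ "silence" :: w))
        = seg ++ "silence" :: pvEmit m (some "silence") (pvGroupby w) := by
  intro n
  induction n with
  | zero => intro seg h _; omega
  | succ n ih =>
    intro seg hlen hfree w prev hprev
    cases seg with
    | nil => rw [List.nil_append, pvEmit_peel, List.nil_append]
    | cons a t =>
      simp only [List.mem_cons, not_or] at hfree
      have ha : a ≠ "silence" := fun he => hfree.1 he.symm
      have hfree2 : "silence" ∉ t.dropWhile (· == a) := by
        intro hmem
        exact hfree.2 ((List.dropWhile_sublist _).mem hmem)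
      have hrun := pvHeadRun a t
      have hsplit : (a :: t) ++ "silence" :: w
          = List.replicate ((t.takeWhile (· == a)).length + 1) a
            ++ (t.dropWhile (· == a) ++ "silence" :: w) := by
        conv_lhs => rw [hrun]
        rw [List.append_assoc]
      cases ht' : t.dropWhile (· == a) with
      | nil =>
        rw [hsplit, ht', List.nil_append]
        rw [pvGroupby_run a "silence" (fun he => ha he.symm) _ w]
        rw [pvEmit_cons, pvGroupby_head]
        rw [if_neg (by
          intro hx
          exact hprev hx.2.2.1)]
        rw [pvEmit_peel]
        conv_rhs => rw [hrun]
        rw [ht', List.append_nil]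
      | cons b t'' =>
        have hb : b ≠ a := pvDW_head a b t t'' ht'
        rw [hsplit, ht', List.cons_append]
        rw [pvGroupby_run a b hb _ (t'' ++ "silence" :: w)]
        rw [pvEmit_cons, pvGroupby_head]
        rw [if_neg (by intro hx; exact hprev hx.2.2.1)]
        rw [← List.cons_append]
        rw [ih (b :: t'') (by
            have := List.length_dropWhile_le (· == a) t
            rw [ht'] at this
            simp only [List.length_cons] at this hlen ⊢
            omega)
          (by rw [← ht']; exact hfree2) w (some a) (by
            intro he
            exact ha (by simpa using he))]
        conv_rhs => rw [hrun]
        rw [ht', List.append_assoc, List.cons_append]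

-- set-cardinality facts for the uniformity test
theorem pvOfList_rep (a : String) (n : Nat) :
    PySem.Set.ofList (List.replicate (n + 1) a) = [a] := by
  induction n with
  | zero => simp [PySem.Set.ofList_cons, PySem.Set.discard]
  | succ n ih =>
    rw [List.replicate_succ, PySem.Set.ofList_cons, ih]
    simp [PySem.Set.discard]

theorem pvOfList_ne_one (l : List String) (a b : String) (hab : a ≠ b)
    (hal : a ∈ l) (hbl : b ∈ l) : (PySem.Set.ofList l).length ≠ 1 := by
  intro h1
  obtain ⟨x, hx⟩ := List.length_eq_one_iff.mp h1
  have hax : a ∈ PySem.Set.ofList l := (PySem.Set.mem_ofList l a).mpr hal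
  have hbx : b ∈ PySem.Set.ofList l := (PySem.Set.mem_ofList l b).mpr hbl
  rw [hx] at hax hbx
  simp only [List.mem_singleton] at hax hbx
  exact hab (hax.trans hbx.symm)

-- the conditional replacement of a gap between two silences
theorem pvEmit_gap (m : Int) (seg w : List String) (h : "silence" ∉ seg) :
    pvEmit m (some "silence") (pvGroupby (seg ++ "silence" :: w))
      = (if (PySem.Set.ofList seg).length = 1 ∧ (seg.length : Int) ≤ m
         then List.replicate seg.length "silence" else seg)
        ++ "silence" :: pvEmit m (some "silence") (pvGroupby w) := by
  cases seg with
  | nil =>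
    rw [List.nil_append, pvEmit_peel]
    rw [if_neg (by intro hx; simp [PySem.Set.ofList_nil] at hx)]
    rw [List.nil_append]
  | cons a t =>
    simp only [List.mem_cons, not_or] at h
    have ha : a ≠ "silence" := fun he => h.1 he.symm
    have hrun := pvHeadRun a t
    have hsplit : (a :: t) ++ "silence" :: w
        = List.replicate ((t.takeWhile (· == a)).length + 1) a
          ++ (t.dropWhile (· == a) ++ "silence" :: w) := by
      conv_lhs => rw [hrun]
      rw [List.append_assoc]
    cases ht' : t.dropWhile (· == a) with
    | nil =>
      -- seg is one uniform run
      have hseg : a :: t = List.replicate ((t.takeWhile (· == a)).length + 1) a := by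
        conv_lhs => rw [hrun]; rw [ht', List.append_nil]
      rw [hsplit, ht', List.nil_append]
      rw [pvGroupby_run a "silence" (fun he => ha he.symm) _ w]
      rw [pvEmit_cons, pvGroupby_head]
      have hcond : (a ≠ "silence" ∧ (((t.takeWhile (· == a)).length + 1 : Nat) : Int) ≤ m ∧
            some "silence" = some "silence" ∧ ("silence" :: w).head? = some "silence")
          ↔ ((((t.takeWhile (· == a)).length + 1 : Nat) : Int) ≤ m) := by
        constructor
        · exact fun hx => hx.2.1
        · exact fun hx => ⟨ha, hx, rfl, rfl⟩
      have hcard : (PySem.Set.ofList (a :: t)).length = 1 := by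
        rw [hseg, pvOfList_rep]
        rfl
      have hlenseg : (a :: t).length = (t.takeWhile (· == a)).length + 1 := by
        rw [hseg, List.length_replicate]
      by_cases hm : (((t.takeWhile (· == a)).length + 1 : Nat) : Int) ≤ m
      · rw [if_pos (hcond.mpr hm), if_pos (by
          refine ⟨hcard, ?_⟩
          rw [hlenseg]
          exact_mod_cast hm)]
        rw [pvEmit_peel, hlenseg]
      · rw [if_neg (fun hx => hm (hcond.mp hx)), if_neg (by
          intro hx
          apply hm
          have := hx.2
          rw [hlenseg] at this
          exact_mod_cast this)]
        rw [pvEmit_peel, hseg]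
    | cons b t'' =>
      have hb : b ≠ a := pvDW_head a b t t'' ht'
      have hbmem : b ∈ a :: t := by
        have : b ∈ t.dropWhile (· == a) := by rw [ht']; simp
        exact List.mem_cons_of_mem a ((List.dropWhile_sublist _).mem this)
      rw [hsplit, ht', List.cons_append]
      rw [pvGroupby_run a b hb _ (t'' ++ "silence" :: w)]
      rw [pvEmit_cons, pvGroupby_head]
      rw [if_neg (by
        intro hx
        have hbs : b ≠ "silence" := by
          rcases List.mem_cons.mp hbmem with h1 | h1
          · exact fun he => ha (h1 ▸ he)
          · exact fun he => h.2 (he ▸ h1)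
        exact hbs (by simpa using hx.2.2.2))]
      rw [← List.cons_append]
      rw [pvEmit_free_before m ((b :: t'').length + 1) (b :: t'') (by omega)
        (by rw [← ht']
            intro hmem
            exact h.2 ((List.dropWhile_sublist _).mem hmem))
        w (some a) (by intro he; exact ha (by simpa using he))]
      rw [if_neg (by
        intro hx
        exact pvOfList_ne_one (a :: t) a b (fun he => hb he.symm)
          (List.mem_cons_self) hbmem hx.1)]
      conv_rhs => rw [hrun]
      rw [ht', List.append_assoc, List.cons_append]

theorem pvINV (m : Int) :
    ∀ (n : Nat) (v : List String), v.length < n →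
      pvBLoopN ("silence" :: v) m ("silence" :: v)
          ((pvSilN ("silence" :: v)).zip (pvSilN ("silence" :: v)).tail)
        = "silence" :: pvEmit m (some "silence") (pvGroupby v) := by
  intro n
  induction n with
  | zero => intro v hv; omega
  | succ n ih =>
    intro v hv
    have hsil : pvSilN ("silence" :: v) = 0 :: (pvSilN v).map (· + 1) := by
      rw [pvSilN, if_pos rfl, List.singleton_append]
    by_cases hmem : "silence" ∈ v
    · obtain ⟨seg, w, hvsplit, hfree⟩ := pvDecomp v hmem
      have hT : pvSilN ("silence" :: w) = 0 :: (pvSilN w).map (· + 1) := by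
        rw [pvSilN, if_pos rfl, List.singleton_append]
      have hSv : pvSilN v = (pvSilN ("silence" :: w)).map (· + seg.length) := by
        rw [hvsplit]
        exact pvSilN_append_free seg _ hfree
      have hS : pvSilN ("silence" :: v)
          = 0 :: (pvSilN ("silence" :: w)).map (· + (seg.length + 1)) := by
        rw [hsil, hSv, List.map_map]
        have hm : (pvSilN ("silence" :: w)).map ((· + 1) ∘ (· + seg.length))
            = (pvSilN ("silence" :: w)).map (· + (seg.length + 1)) := by
          apply List.map_congr_left
          intro x _
          simp only [Function.comp_apply]
          omega
        rw [hm]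
      have hpairs : (pvSilN ("silence" :: v)).zip (pvSilN ("silence" :: v)).tail
          = (0, seg.length + 1)
            :: ((pvSilN ("silence" :: w)).zip (pvSilN ("silence" :: w)).tail).map
                (Prod.map (· + (seg.length + 1)) (· + (seg.length + 1))) := by
        rw [hS, List.tail_cons]
        conv_lhs => rw [hT]
        rw [List.map_cons, List.zip_cons_cons, ← List.zip_map]
        congr 1
        simp
      rw [hpairs, pvBLoopN]
      have hdrop1 : ("silence" :: v).drop (0 + 1) = v := by simp
      have hgap : (("silence" :: v).drop (0 + 1)).take (seg.length + 1 - (0 + 1)) = seg := by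
        rw [hdrop1, Nat.add_sub_cancel, hvsplit, List.take_left]
      rw [hgap]
      have hdropj : ("silence" :: v).drop (seg.length + 1) = "silence" :: w := by
        rw [List.drop_succ_cons, hvsplit, List.drop_left]
      have htake1 : ("silence" :: v).take (0 + 1) = ["silence"] := by simp
      set C := ((seg.length : Int) ≤ m ∧ (PySem.Set.ofList seg).length = 1) with hC
      have hout : (if C then ("silence" :: v).take (0 + 1)
              ++ List.replicate seg.length "silence" ++ ("silence" :: v).drop (seg.length + 1)
            else "silence" :: v)
          = ("silence" :: (if C then List.replicate seg.length "silence" else seg))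
            ++ ("silence" :: w) := by
        split
        · rw [htake1, hdropj]
          simp
        · rw [hvsplit]
          simp
      rw [hout]
      have hflen : ("silence" :: (if C then List.replicate seg.length "silence" else seg)).length
          = seg.length + 1 := by
        split <;> simp
      rw [show (Prod.map (fun x => x + (seg.length + 1)) fun x => x + (seg.length + 1))
          = (Prod.map
              (· + ("silence" :: (if C then List.replicate seg.length "silence" else seg)).length)
              (· + ("silence" :: (if C then List.replicate seg.length "silence" else seg)).length))
        from by rw [hflen]]
      rw [pvBLoopN_shift]
      rw [hflen, hdropj]
      have hwlen : w.length < n := by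
        have : v.length = seg.length + 1 + w.length := by rw [hvsplit]; simp; omega
        omega
      rw [ih w hwlen]
      rw [hvsplit, pvEmit_gap m seg w hfree]
      have hcond : C ↔ ((PySem.Set.ofList seg).length = 1 ∧ (seg.length : Int) ≤ m) := by
        rw [hC, and_comm]
      by_cases hc : C
      · rw [if_pos hc, if_pos (hcond.mp hc)]
        simp
      · rw [if_neg hc, if_neg (fun hx => hc (hcond.mpr hx))]
        simp
    · rw [pvSilN_eq_nil v hmem] at hsil
      rw [hsil]
      rw [List.map_nil, List.tail_cons, List.zip_nil_right]
      rw [pvBLoopN]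
      rw [pvEmit_free m (v.length + 1) v (by omega) hmem]

-- ===== VERDICT (by name: the statement is the Claim_ definition above) =====
theorem remove_short_non_silence_runs_spec : Claim_equal_remove_short_non_silence_runs := by
  intro labels max_run_length _
  unfold Spec_remove_short_non_silence_runs remove_short_non_silence_runs
    remove_short_non_silence_runs_alt
  split
  · rfl
  · rename_i hguard
    have hA := pvLoopA_eq max_run_length labels (labels.length + 1) [] none (by simp) (by simp)
    simp only [List.length_nil, List.drop_zero, List.nil_append] at hA
    rw [hA]
    show pvEmit max_run_length none (pvGroupby labels)
      = pvBLoop labels max_run_length labels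
          ((pvSilenceAt labels).zip (PySem.List.slice (pvSilenceAt labels) (some 1) none))
    rw [PySem.List.slice_from_one, pvSilenceAt_eq]
    rw [← List.map_tail, List.zip_map, pvBLoop_eq]
    by_cases hmem : "silence" ∈ labels
    · obtain ⟨seg, w, hsplit, hfree⟩ := pvDecomp labels hmem
      have hS : pvSilN labels = (pvSilN ("silence" :: w)).map (· + seg.length) := by
        rw [hsplit]
        exact pvSilN_append_free seg _ hfree
      have hpairs : (pvSilN labels).zip (pvSilN labels).tail
          = ((pvSilN ("silence" :: w)).zip (pvSilN ("silence" :: w)).tail).map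
              (Prod.map (· + seg.length) (· + seg.length)) := by
        rw [hS, ← List.map_tail, List.zip_map]
      rw [hpairs, hsplit]
      rw [show (Prod.map (fun x => x + seg.length) fun x => x + seg.length)
          = (Prod.map (· + seg.length) (· + seg.length)) from rfl]
      have := pvBLoopN_shift max_run_length
        ((pvSilN ("silence" :: w)).zip (pvSilN ("silence" :: w)).tail)
        seg ("silence" :: w) (seg ++ "silence" :: w)
      rw [List.drop_left] at this
      rw [this]
      rw [pvINV max_run_length (w.length + 1) w (by omega)]
      rw [pvEmit_free_before max_run_length (seg.length + 1) seg (by omega) hfree w none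
        (by simp)]
    · rw [pvSilN_eq_nil labels hmem]
      rw [pvEmit_free max_run_length (labels.length + 1) labels (by omega) hmem]
      rfl
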